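-- pv_equiv track=rewrite | github.com/Sideloading-Research/telegram_sideload | utils/text_shrinkage_utils/shrink_dialogs.py | identify_valuable_lines
-- ===== SOURCE A (Python) =====
-- def identify_valuable_lines(lines, placeholder, valuable_patterns):
--     """
--     Identify valuable lines based on the patterns dictionary.
--
--     Args:
--         lines: List of text lines
--         placeholder: Placeholder text to skip already processed lines
--         valuable_patterns: Dictionary mapping patterns to their detection method
--
--     Returns:
--         Set of line indices considered valuable
--     """
--     valuable_indices = set()
--     for i in range(len(lines)):
--         # Skip placeholder lines
--         if lines[i] == placeholder:
--             continue
--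
--         # Check if current line matches any valuable pattern
--         for pattern, method in valuable_patterns.items():
--             if (method == "start" and lines[i].startswith(pattern)) or (
--                 method == "contains" and pattern in lines[i]
--             ):
--                 valuable_indices.add(i)
--                 # Also mark the next line as valuable if it exists
--                 if i + 1 < len(lines):
--                     valuable_indices.add(i + 1)
--                 break  # Once we've found a matching pattern, no need to check others
--
--     return valuable_indices
-- ===== SOURCE B (Python) =====
-- def identify_valuable_lines(lines, placeholder, valuable_patterns):
--     # Pattern-major: for each pattern collect the set of matching line indices,
--     # union them, then keep every index whose own line or predecessor line hit.
--     hits = set()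
--     for pattern, method in valuable_patterns.items():
--         if method == "start":
--             hits |= {i for i, ln in enumerate(lines)
--                      if ln != placeholder and ln.startswith(pattern)}
--         elif method == "contains":
--             hits |= {i for i, ln in enumerate(lines)
--                      if ln != placeholder and pattern in ln}
--     return {i for i in range(len(lines)) if i in hits or i - 1 in hits}
-- ===== Notes on version B (the rewrite author's own statement) =====
-- stated objective: alternative
-- what changed: Inverts the loop nesting: instead of A's line-major scan with an inner break over the pattern dict and forward-marking i/i+1 into a mutable set, B is pattern-major - for each pattern it collects the whole set of matching line indices as one comprehension, unions these per-pattern sets, and a final range pass keeps i iff i or i-1 is a hit (correct because set union makes first-match break irrelevant).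
import Mathlib
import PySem

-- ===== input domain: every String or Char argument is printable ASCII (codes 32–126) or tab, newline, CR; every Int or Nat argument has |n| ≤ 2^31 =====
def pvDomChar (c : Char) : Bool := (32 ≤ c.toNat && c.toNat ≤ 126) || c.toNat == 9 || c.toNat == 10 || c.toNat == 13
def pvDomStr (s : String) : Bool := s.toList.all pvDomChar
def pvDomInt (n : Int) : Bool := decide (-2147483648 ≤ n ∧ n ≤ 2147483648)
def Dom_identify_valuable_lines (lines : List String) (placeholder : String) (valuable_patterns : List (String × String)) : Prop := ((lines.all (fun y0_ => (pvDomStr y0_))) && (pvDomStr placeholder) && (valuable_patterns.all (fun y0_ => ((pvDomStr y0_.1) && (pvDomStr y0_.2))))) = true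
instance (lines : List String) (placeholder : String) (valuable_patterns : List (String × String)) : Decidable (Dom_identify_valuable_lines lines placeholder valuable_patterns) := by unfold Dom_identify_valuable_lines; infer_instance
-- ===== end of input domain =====

-- B inverts the loop nesting: pattern-major union of per-pattern matching-index sets,
-- then a range pass keeping i iff i or i-1 is a hit; objective: alternative.


-- ===== PORT A =====
-- A's inner 'for pattern, method in valuable_patterns.items(): … break': the first matching
-- pattern only decides whether the marking branch fires, transcribed as this break-style recursion.
def pvMatchA (line : String) : List (String × String) → Bool
  | [] => false
  | (pattern, method) :: rest =>
    if (method == "start" && PySem.Str.startswith line pattern)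
        || (method == "contains" && PySem.Str.isIn pattern line) then true
    else pvMatchA line rest

def identify_valuable_lines (lines : List String) (placeholder : String) (valuable_patterns : List (String × String)) : List Int :=
  (List.range lines.length).foldl (fun valuable_indices i =>
      let line := lines.getD i ""        -- lines[i]: i ∈ range(len(lines)), so in range
      if line == placeholder then valuable_indices
      else if pvMatchA line valuable_patterns then
        let s := PySem.Set.add valuable_indices (i : Int)
        if i + 1 < lines.length then PySem.Set.add s ((i : Int) + 1) else s
      else valuable_indices)
    PySem.Set.empty

-- ===== PORT B =====
-- Source B's per-pattern set comprehension {i for i, ln in enumerate(lines) if ln != placeholder and <cond>}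
def pvCompHits (lines : List String) (placeholder : String) (cond : String → Bool) : PySem.Set Int :=
  PySem.Set.ofList (((PySem.List.enumerate lines).filter
    (fun p => !(p.2 == placeholder) && cond p.2)).map (·.1))

def identify_valuable_lines_alt (lines : List String) (placeholder : String) (valuable_patterns : List (String × String)) : List Int :=
  let hits := valuable_patterns.foldl (fun hits pm =>
    if pm.2 == "start" then
      PySem.Set.union hits (pvCompHits lines placeholder (fun ln => PySem.Str.startswith ln pm.1))
    else if pm.2 == "contains" then
      PySem.Set.union hits (pvCompHits lines placeholder (fun ln => PySem.Str.isIn pm.1 ln))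
    else hits) PySem.Set.empty
  PySem.Set.ofList (((List.range lines.length).filter (fun i =>
      PySem.Set.contains hits (Int.ofNat i) || PySem.Set.contains hits (Int.ofNat i - 1))).map Int.ofNat)

-- ===== PRECONDITION & SPEC =====
def Spec_identify_valuable_lines (lines : List String) (placeholder : String) (valuable_patterns : List (String × String)) (out : List Int) : Prop := out = identify_valuable_lines_alt lines placeholder valuable_patterns
instance (lines : List String) (placeholder : String) (valuable_patterns : List (String × String)) (out : List Int) : Decidable (Spec_identify_valuable_lines lines placeholder valuable_patterns out) := by unfold Spec_identify_valuable_lines; infer_instance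

-- ===== CLAIM (what is proved, stated in full; the proofs are below) =====
def Claim_equal_identify_valuable_lines : Prop := ∀ (lines : List String) (placeholder : String) (valuable_patterns : List (String × String)), Dom_identify_valuable_lines lines placeholder valuable_patterns → Spec_identify_valuable_lines lines placeholder valuable_patterns (identify_valuable_lines lines placeholder valuable_patterns)

-- ===== LEMMAS AND PROOFS =====

-- proof-side helper: "line is not the placeholder and some pattern matches it"
def pvFlagB (placeholder : String) (valuable_patterns : List (String × String)) (line : String) : Bool :=
  !(line == placeholder) && valuable_patterns.any (fun pm =>
      (pm.2 == "start" && PySem.Str.startswith line pm.1)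
      || (pm.2 == "contains" && PySem.Str.isIn pm.1 line))

theorem pvMatchA_eq_any (line : String) (vp : List (String × String)) :
    pvMatchA line vp = vp.any (fun pm =>
      (pm.2 == "start" && PySem.Str.startswith line pm.1)
      || (pm.2 == "contains" && PySem.Str.isIn pm.1 line)) := by
  induction vp with
  | nil => rfl
  | cons pm rest ih =>
    obtain ⟨p, m⟩ := pm
    rw [pvMatchA, List.any_cons, ← ih]
    by_cases h : ((m == "start" && PySem.Str.startswith line p)
        || (m == "contains" && PySem.Str.isIn p line)) = true
    · rw [if_pos h, h, Bool.true_or]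
    · have h' : ((m == "start" && PySem.Str.startswith line p)
          || (m == "contains" && PySem.Str.isIn p line)) = false := by simpa using h
      rw [if_neg h, h', Bool.false_or]

theorem pvFlagB_eq (placeholder line : String) (vp : List (String × String)) :
    pvFlagB placeholder vp line = (!(line == placeholder) && pvMatchA line vp) := by
  rw [pvFlagB, pvMatchA_eq_any]

-- membership in one per-pattern comprehension set
theorem pvCompHits_mem (lines : List String) (placeholder : String) (cond : String → Bool) (x : Int) :
    x ∈ pvCompHits lines placeholder cond ↔
      ∃ i : Nat, x = (i : Int) ∧ i < lines.length ∧
        (!(lines.getD i "" == placeholder) && cond (lines.getD i "")) = true := by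
  rw [pvCompHits, PySem.Set.mem_ofList, List.mem_map]
  constructor
  · rintro ⟨p, hp, rfl⟩
    rw [List.mem_filter] at hp
    obtain ⟨hpm, hpc⟩ := hp
    rw [PySem.List.mem_enumerate_iff] at hpm
    obtain ⟨k, hk, rfl⟩ := hpm
    refine ⟨k, by simp, hk, ?_⟩
    rwa [List.getD_eq_getElem _ _ hk]
  · rintro ⟨i, rfl, hi, hc⟩
    refine ⟨((i : Int), lines[i]), ?_, rfl⟩
    rw [List.mem_filter]
    constructor
    · rw [PySem.List.mem_enumerate_iff]
      exact ⟨i, hi, by simp⟩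
    · rwa [List.getD_eq_getElem _ _ hi] at hc

-- membership after the pattern-major fold
theorem pvHits_mem (lines : List String) (placeholder : String) (vp : List (String × String))
    (s : PySem.Set Int) (x : Int) :
    x ∈ vp.foldl (fun hits pm =>
      if pm.2 == "start" then
        PySem.Set.union hits (pvCompHits lines placeholder (fun ln => PySem.Str.startswith ln pm.1))
      else if pm.2 == "contains" then
        PySem.Set.union hits (pvCompHits lines placeholder (fun ln => PySem.Str.isIn pm.1 ln))
      else hits) s ↔
    x ∈ s ∨ ∃ i : Nat, x = (i : Int) ∧ i < lines.length ∧
      (!(lines.getD i "" == placeholder) &&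
        vp.any (fun pm => (pm.2 == "start" && PySem.Str.startswith (lines.getD i "") pm.1)
          || (pm.2 == "contains" && PySem.Str.isIn pm.1 (lines.getD i "")))) = true := by
  induction vp generalizing s with
  | nil => simp
  | cons pm rest ih =>
    rw [List.foldl_cons, ih]
    have hstep : ∀ t : PySem.Set Int, (x ∈ (if pm.2 == "start" then
        PySem.Set.union t (pvCompHits lines placeholder (fun ln => PySem.Str.startswith ln pm.1))
      else if pm.2 == "contains" then
        PySem.Set.union t (pvCompHits lines placeholder (fun ln => PySem.Str.isIn pm.1 ln))
      else t)) ↔ x ∈ t ∨ ∃ i : Nat, x = (i : Int) ∧ i < lines.length ∧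
        (!(lines.getD i "" == placeholder) &&
          ((pm.2 == "start" && PySem.Str.startswith (lines.getD i "") pm.1)
            || (pm.2 == "contains" && PySem.Str.isIn pm.1 (lines.getD i "")))) = true := by
      intro t
      by_cases h1 : (pm.2 == "start") = true
      · have he : pm.2 = "start" := by simpa using h1
        rw [if_pos h1, PySem.Set.mem_union, pvCompHits_mem]
        refine or_congr Iff.rfl (exists_congr fun i => and_congr_right fun _ => and_congr_right fun _ => ?_)
        rw [he]; simp
      · rw [if_neg h1]
        have h1' : (pm.2 == "start") = false := by simpa using h1
        by_cases h2 : (pm.2 == "contains") = true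
        · have he : pm.2 = "contains" := by simpa using h2
          rw [if_pos h2, PySem.Set.mem_union, pvCompHits_mem]
          refine or_congr Iff.rfl (exists_congr fun i => and_congr_right fun _ => and_congr_right fun _ => ?_)
          rw [he]; simp
        · rw [if_neg h2]
          have h2' : (pm.2 == "contains") = false := by simpa using h2
          constructor
          · exact fun h => Or.inl h
          · rintro (h | ⟨i, _, _, hc⟩)
            · exact h
            · rw [h1', h2'] at hc; simp at hc
    rw [hstep]
    simp only [List.any_cons, Bool.and_eq_true, Bool.or_eq_true]
    constructor
    · rintro ((h | ⟨i, hx, hi, hph, hc⟩) | ⟨i, hx, hi, hph, hc⟩)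
      · exact Or.inl h
      · exact Or.inr ⟨i, hx, hi, hph, Or.inl hc⟩
      · exact Or.inr ⟨i, hx, hi, hph, Or.inr hc⟩
    · rintro (h | ⟨i, hx, hi, hph, hc | hc⟩)
      · exact Or.inl (Or.inl h)
      · exact Or.inl (Or.inr ⟨i, hx, hi, hph, hc⟩)
      · exact Or.inr ⟨i, hx, hi, hph, hc⟩

-- the step k → k+1 of the per-index predicate when line k does not fire
theorem pvPred_step_false (f : Nat → Bool) (k i : Nat) (hfk : f k = false) :
    ((i < k + 1 ∧ f i = true) ∨ (0 < i ∧ i ≤ k + 1 ∧ f (i - 1) = true)) ↔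
    ((i < k ∧ f i = true) ∨ (0 < i ∧ i ≤ k ∧ f (i - 1) = true)) := by
  constructor
  · rintro (⟨h1, h2⟩ | ⟨h1, h2, h3⟩)
    · left
      refine ⟨?_, h2⟩
      by_contra h
      have hik : i = k := by omega
      rw [hik, hfk] at h2; exact Bool.false_ne_true h2
    · right
      refine ⟨h1, ?_, h3⟩
      by_contra h
      have hik : i - 1 = k := by omega
      rw [hik, hfk] at h3; exact Bool.false_ne_true h3
  · rintro (⟨h1, h2⟩ | ⟨h1, h2, h3⟩)
    · exact Or.inl ⟨by omega, h2⟩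
    · exact Or.inr ⟨h1, by omega, h3⟩

-- after processing indices 0..k-1, A's accumulator is strictly increasing and its members
-- are exactly the i < n with (i < k and flag i) or (0 < i ≤ k and flag (i-1))
theorem pvA_invariant (lines : List String) (placeholder : String) (vp : List (String × String)) (k : Nat) (hk : k ≤ lines.length) :
    ((List.range k).foldl (fun valuable_indices i =>
      let line := lines.getD i ""
      if line == placeholder then valuable_indices
      else if pvMatchA line vp then
        let s := PySem.Set.add valuable_indices (i : Int)
        if i + 1 < lines.length then PySem.Set.add s ((i : Int) + 1) else s
      else valuable_indices) PySem.Set.empty).Pairwise (· < ·) ∧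
    ∀ x : Int, x ∈ ((List.range k).foldl (fun valuable_indices i =>
      let line := lines.getD i ""
      if line == placeholder then valuable_indices
      else if pvMatchA line vp then
        let s := PySem.Set.add valuable_indices (i : Int)
        if i + 1 < lines.length then PySem.Set.add s ((i : Int) + 1) else s
      else valuable_indices) PySem.Set.empty) ↔
      ∃ i : Nat, x = (i : Int) ∧ i < lines.length ∧
        ((i < k ∧ pvFlagB placeholder vp (lines.getD i "") = true) ∨
         (0 < i ∧ i ≤ k ∧ pvFlagB placeholder vp (lines.getD (i - 1) "") = true)) := by
  induction k with
  | zero => simp [PySem.Set.empty]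
  | succ k ih =>
    have hk' : k ≤ lines.length := Nat.le_of_succ_le hk
    obtain ⟨hpw, hmem⟩ := ih hk'
    rw [List.range_succ, List.foldl_append, List.foldl_cons, List.foldl_nil]
    set F := (List.range k).foldl (fun valuable_indices i =>
      let line := lines.getD i ""
      if line == placeholder then valuable_indices
      else if pvMatchA line vp then
        let s := PySem.Set.add valuable_indices (i : Int)
        if i + 1 < lines.length then PySem.Set.add s ((i : Int) + 1) else s
      else valuable_indices) PySem.Set.empty with hF
    have hbound : ∀ x ∈ F, ∃ i : Nat, x = (i : Int) ∧ i ≤ k := by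
      intro x hx
      obtain ⟨i, hxi, _, h⟩ := (hmem x).1 hx
      exact ⟨i, hxi, by omega⟩
    show (List.Pairwise (· < ·) (if (lines.getD k "" == placeholder) = true then F
      else if pvMatchA (lines.getD k "") vp = true then
        (if k + 1 < lines.length then PySem.Set.add (PySem.Set.add F (k : Int)) ((k : Int) + 1)
         else PySem.Set.add F (k : Int))
      else F)) ∧ _
    by_cases hph : (lines.getD k "" == placeholder) = true
    · -- placeholder line: flag k is false, accumulator unchanged
      have hfk : pvFlagB placeholder vp (lines.getD k "") = false := by
        rw [pvFlagB_eq, hph]; rfl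
      rw [if_pos hph]
      refine ⟨hpw, fun x => (hmem x).trans ?_⟩
      exact exists_congr fun i => and_congr_right fun _ => and_congr_right fun _ =>
        (pvPred_step_false (fun j => pvFlagB placeholder vp (lines.getD j "")) k i hfk).symm
    · rw [if_neg hph]
      by_cases hm : pvMatchA (lines.getD k "") vp = true
      · -- matching line: add k, then k+1 if in range
        have hfk : pvFlagB placeholder vp (lines.getD k "") = true := by
          have hph' : (lines.getD k "" == placeholder) = false := by simpa using hph
          rw [pvFlagB_eq, hph', hm]; rfl
        rw [if_pos hm]
        have hle : ∀ x ∈ F, x ≤ (k : Int) := by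
          intro x hx
          obtain ⟨i, rfl, hik⟩ := hbound x hx
          exact_mod_cast hik
        have hpw1 : (PySem.Set.add F (k : Int)).Pairwise (· < ·) := by
          by_cases hkin : (k : Int) ∈ F
          · rw [PySem.Set.add_of_mem hkin]; exact hpw
          · rw [PySem.Set.add_of_not_mem hkin, List.pairwise_append]
            refine ⟨hpw, List.pairwise_singleton _ _, ?_⟩
            intro x hx y hy
            rw [List.mem_singleton] at hy
            subst hy
            rcases lt_or_eq_of_le (hle x hx) with h | h
            · exact h
            · exact absurd (h ▸ hx) hkin
        have hmem1 : ∀ x : Int, x ∈ PySem.Set.add F (k : Int) ↔ x ∈ F ∨ x = (k : Int) :=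
          fun x => PySem.Set.mem_add F _ x
        by_cases hk1 : k + 1 < lines.length
        · rw [if_pos hk1]
          have hnotin : ((k : Int) + 1) ∉ PySem.Set.add F (k : Int) := by
            rw [hmem1]
            rintro (h | h)
            · have := hle _ h; omega
            · omega
          rw [PySem.Set.add_of_not_mem hnotin]
          constructor
          · rw [List.pairwise_append]
            refine ⟨hpw1, List.pairwise_singleton _ _, ?_⟩
            intro x hx y hy
            rw [List.mem_singleton] at hy
            subst hy
            rcases (hmem1 x).1 hx with h | h
            · have := hle _ h; omega
            · omega
          · intro x
            rw [List.mem_append, List.mem_singleton, hmem1, hmem x]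
            constructor
            · rintro ((⟨i, hx, hn, h⟩ | hx) | hx)
              · refine ⟨i, hx, hn, ?_⟩
                rcases h with ⟨h1, h2⟩ | ⟨h1, h2, h3⟩
                · exact Or.inl ⟨by omega, h2⟩
                · exact Or.inr ⟨h1, by omega, h3⟩
              · exact ⟨k, hx, by omega, Or.inl ⟨by omega, hfk⟩⟩
              · refine ⟨k + 1, by rw [hx]; push_cast; ring, hk1, ?_⟩
                exact Or.inr ⟨by omega, by omega, by simpa using hfk⟩
            · rintro ⟨i, hx, hn, ⟨hik, hf⟩ | ⟨hi0, hik, hf⟩⟩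
              · rcases Nat.lt_succ_iff_lt_or_eq.1 hik with h' | h'
                · exact Or.inl (Or.inl ⟨i, hx, hn, Or.inl ⟨h', hf⟩⟩)
                · subst h'; exact Or.inl (Or.inr hx)
              · rcases Nat.lt_succ_iff_lt_or_eq.1 (Nat.lt_succ_of_le hik) with h' | h'
                · exact Or.inl (Or.inl ⟨i, hx, hn, Or.inr ⟨hi0, by omega, hf⟩⟩)
                · right; subst h'; rw [hx]; push_cast; ring
        · -- k is the last index: only k is added
          rw [if_neg hk1]
          refine ⟨hpw1, fun x => ?_⟩
          rw [hmem1, hmem x]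
          constructor
          · rintro (⟨i, hx, hn, h⟩ | hx)
            · refine ⟨i, hx, hn, ?_⟩
              rcases h with ⟨h1, h2⟩ | ⟨h1, h2, h3⟩
              · exact Or.inl ⟨by omega, h2⟩
              · exact Or.inr ⟨h1, by omega, h3⟩
            · exact ⟨k, hx, by omega, Or.inl ⟨by omega, hfk⟩⟩
          · rintro ⟨i, hx, hn, ⟨hik, hf⟩ | ⟨hi0, hik, hf⟩⟩
            · rcases Nat.lt_succ_iff_lt_or_eq.1 hik with h' | h'
              · exact Or.inl ⟨i, hx, hn, Or.inl ⟨h', hf⟩⟩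
              · subst h'; exact Or.inr hx
            · rcases Nat.lt_succ_iff_lt_or_eq.1 (Nat.lt_succ_of_le hik) with h' | h'
              · exact Or.inl ⟨i, hx, hn, Or.inr ⟨hi0, by omega, hf⟩⟩
              · omega
      · -- non-placeholder, non-matching line: flag k is false, accumulator unchanged
        have hfk : pvFlagB placeholder vp (lines.getD k "") = false := by
          have hm' : pvMatchA (lines.getD k "") vp = false := by simpa using hm
          rw [pvFlagB_eq, hm', Bool.and_false]
        rw [if_neg hm]
        refine ⟨hpw, fun x => (hmem x).trans ?_⟩
        exact exists_congr fun i => and_congr_right fun _ => and_congr_right fun _ =>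
          (pvPred_step_false (fun j => pvFlagB placeholder vp (lines.getD j "")) k i hfk).symm

theorem pvB_characterization (lines : List String) (placeholder : String) (vp : List (String × String)) :
    (identify_valuable_lines_alt lines placeholder vp).Pairwise (· < ·) ∧
    ∀ x : Int, x ∈ identify_valuable_lines_alt lines placeholder vp ↔
      ∃ i : Nat, x = (i : Int) ∧ i < lines.length ∧
        ((i < lines.length ∧ pvFlagB placeholder vp (lines.getD i "") = true) ∨
         (0 < i ∧ i ≤ lines.length ∧ pvFlagB placeholder vp (lines.getD (i - 1) "") = true)) := by
  rw [identify_valuable_lines_alt]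
  set hits := vp.foldl (fun hits pm =>
    if pm.2 == "start" then
      PySem.Set.union hits (pvCompHits lines placeholder (fun ln => PySem.Str.startswith ln pm.1))
    else if pm.2 == "contains" then
      PySem.Set.union hits (pvCompHits lines placeholder (fun ln => PySem.Str.isIn pm.1 ln))
    else hits) (PySem.Set.empty : PySem.Set Int) with hhits
  have hmemhits : ∀ x : Int, x ∈ hits ↔ ∃ i : Nat, x = (i : Int) ∧ i < lines.length ∧
      pvFlagB placeholder vp (lines.getD i "") = true := by
    intro x
    rw [hhits, pvHits_mem]
    simp only [PySem.Set.empty, List.not_mem_nil, false_or]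
    exact exists_congr fun i => and_congr_right fun _ => and_congr_right fun _ => by
      rw [pvFlagB]
  have hcont : ∀ (s : PySem.Set Int) (y : Int), PySem.Set.contains s y = true ↔ y ∈ s := by
    intro s y; simp [PySem.Set.contains]
  have hnd : (((List.range lines.length).filter (fun i =>
      PySem.Set.contains hits (Int.ofNat i) || PySem.Set.contains hits (Int.ofNat i - 1))).map Int.ofNat).Nodup :=
    List.Nodup.map (fun a b h => Int.ofNat.inj h) (List.Nodup.filter _ List.nodup_range)
  rw [PySem.Set.ofList_eq_self_of_nodup _ hnd]
  constructor
  · refine List.Pairwise.map _ (fun {a b} h => ?_) (List.Pairwise.filter _ List.pairwise_lt_range)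
    exact Int.ofNat_lt.2 h
  · intro x
    rw [List.mem_map]
    constructor
    · rintro ⟨i, hi, rfl⟩
      rw [List.mem_filter, List.mem_range] at hi
      obtain ⟨hin, hqi⟩ := hi
      refine ⟨i, rfl, hin, ?_⟩
      rw [Bool.or_eq_true, hcont, hcont, hmemhits, hmemhits] at hqi
      rcases hqi with ⟨j, hj, hjn, hf⟩ | ⟨j, hj, hjn, hf⟩
      · have hj2 : (j : Int) = (i : Int) := hj.symm
        have hji : j = i := by exact_mod_cast hj2
        subst hji
        exact Or.inl ⟨hjn, hf⟩
      · have hj' : (i : Int) - 1 = (j : Int) := hj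
        have hi0 : 0 < i := by omega
        have hji : j = i - 1 := by omega
        subst hji
        exact Or.inr ⟨hi0, by omega, hf⟩
    · rintro ⟨i, rfl, hin, h⟩
      refine ⟨i, ?_, rfl⟩
      rw [List.mem_filter, List.mem_range]
      refine ⟨hin, ?_⟩
      rw [Bool.or_eq_true, hcont, hcont, hmemhits, hmemhits]
      rcases h with ⟨_, hf⟩ | ⟨h0, _, hf⟩
      · exact Or.inl ⟨i, rfl, hin, hf⟩
      · refine Or.inr ⟨i - 1, ?_, by omega, hf⟩
        show (i : Int) - 1 = ((i - 1 : Nat) : Int)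
        omega

-- ===== VERDICT (by name: the statement is the Claim_ definition above) =====
theorem identify_valuable_lines_spec : Claim_equal_identify_valuable_lines := by
  intro lines placeholder vp _
  unfold Spec_identify_valuable_lines
  obtain ⟨hApw, hAmem⟩ := pvA_invariant lines placeholder vp lines.length (le_refl _)
  obtain ⟨hBpw, hBmem⟩ := pvB_characterization lines placeholder vp
  have hmemiff : ∀ x : Int, x ∈ identify_valuable_lines lines placeholder vp ↔
      x ∈ identify_valuable_lines_alt lines placeholder vp := by
    intro x
    exact Iff.trans (hAmem x) (hBmem x).symm
  have hperm : List.Perm (identify_valuable_lines lines placeholder vp)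
      (identify_valuable_lines_alt lines placeholder vp) :=
    (List.perm_ext_iff_of_nodup (hApw.imp ne_of_lt) (hBpw.imp ne_of_lt)).2 hmemiff
  exact hperm.eq_of_pairwise (fun a _ b _ h1 h2 => absurd h2 (not_lt.2 h1.le)) hApw hBpw
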